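/- GENERATED by mk_final_copies.py from the proof of the farm's unit `start_decoder.C13c` (farm:start_decoder.C13c.1: Proof.lean) as the
   re-elaboration sweep compiled it — do not edit. -/
/-
  PROOF of the unit `start_decoder.C13c` (0x114f78 → 0x114fe7): from `At13K22` (the check call of `mults[off]`) to `At13K26` (the
  check call of `c->sequence_p`). Four check calls (one walk per call return, `clear w_zmm` at each: SSE after a check), the store
  `multiplicands[j·D + k] = val`; the exit assertion through `c13c_carry` (Lemmas.lean: `C13.carry13` + windows inside the block
  of `multiplicands`).
-/
import Asan.CheckWalk
import Vorbis.Spec.StartDecoderATest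
import Vorbis.Spec.StartDecoderCarry
import Vorbis.Spec.StartDecoderC13
import Vorbis.Spec.Units.start_decoder_C13c
import Vorbis.Spec.Worked.start_decoder_C13c_Lemmas

open X86 X86.User Asan Vorbis Vorbis.Spec Vorbis.Spec.StartDecoder

set_option maxRecDepth 100000
set_option maxHeartbeats 4000000

namespace Vorbis.Spec.start_decoder_C13c

/-- Segment C13c (the body of the inner loop 3913 between its first and its last check call): the check of `mults[off]` (a temp
block: `c13c_site_mults`), `val = mults[off]·delta_value + minimum_value + last` (checks of `c + 14H`, `c + 10H`: `c13c_site`;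
the float bits are opaque) into `d[R+38H]`, `rbp = rdi = &multiplicands[j·D + k]` (`c13c_elem`: no 32-bit wrap since
`j·D + k < N·D ≤ 1FFFFFFFH`, `c13c_index`), its check (`c13c_site_mu`) and the store, `rdi = &c->sequence_p`. The memory changes are
the pushed return addresses `[R − 8, R)`, the local `[R+38H, R+3CH)` and four bytes of the `multiplicands` block: `c13c_carry`. -/
theorem c13c_walk : Vorbis.Spec.start_decoder_C13c.Statement := by
  intro Lay hLay μ hμ u₀ hcode h_load4 h_load2 h_store4
  intro g i n d j kk v hat
  obtain ⟨A, mults, A2, A3, Ai, Am, h, hklt, c_r13, off, hoff, c_rdi, c_rbp⟩ := hat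
  -- the entry state of the function (carried by `Frame`) and the present state `v` at 0x114f78
  have hfr := h.frame
  have he := hfr.entry
  v_entry he
  have w_rip := hfr.rip
  have w_eq : Mem.EqOn Vorbis.L.textLo Vorbis.L.textHi u₀.mem v.mem := hfr.code
  have hdf : v.flags .df = false := (show abiInv _ from hfr.inv).1
  have hmx : v.mxcsr &&& 0x1F80 = 0x1F80 := (show abiInv _ from hfr.inv).2
  have hsse := Vorbis.sseOK_of_abiInv hfr.inv
  have hRA : g.RA = (g.e.reg .rsp).toNat := rfl
  have hpos : Pos g A := Pos.of hfr h.cur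
  have hm0 : MInv g i A2 A3 Ai A v.mem := MInv.of hfr h.cur
  have hcw := hm0.c_where
  have p1 := hpos.r_eq
  have p2 := hpos.ra_lo
  have p3 := hpos.ra_hi
  have hsp : (v.reg .rsp).toNat = g.R := by
    rw [hfr.rsp]
    exact toNat_addr _ (by omega)
  have c_r14 := h.cur.r14
  have c_r15 := h.r15
  have c_r12 := h.r12
  rw [c_rdi] at c_rbp
  -- the check sites of the stretch, and where they are (for `u_omega`)
  have hsM := c13c_site_mults h hoff
  have hs14 := c13c_site h.cur 20 4 (by decide) (by decide)
  have hs10 := c13c_site h.cur 16 4 (by decide) (by decide)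
  have hwhM := Vorbis.Spec.site_where hfr.shadow hfr.offText (by omega) hsM
  have hwh14 := Vorbis.Spec.site_where hfr.shadow hfr.offText (by omega) hs14
  have e : L.textHi = 0x119d40 := rfl
  have ecb : (addr (g.cb v.mem i)).toNat = g.cb v.mem i := toNat_addr _ (by omega)
  have eM : (addr (mults + 2 * off)).toNat = mults + 2 * off := toNat_addr _ (by omega)
  have hMU : v.mem.readLE (addr (g.cb v.mem i) + 32) 8 = Codebook.multiplicands v.mem (g.cb v.mem i) := by
    simp only [vacc, voff, Mem.u64, addr_add_lit]
  -- the element index `x = D·j + k < N·D ≤ 1FFFFFFFH` and the site of `multiplicands[x]`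
  have hdq := h.d_eq
  have hidx := c13c_index h.j_lt (by rw [hdq]; exact hklt) h.prod_le
  rw [hdq] at hidx
  have hsMu := c13c_site_mu h (by rw [hdq]; exact hidx.1)
  have hwhMu := Vorbis.Spec.site_where hfr.shadow hfr.offText (by omega) hsMu
  have helem := c13c_elem d.toNat j kk (Codebook.multiplicands v.mem (g.cb v.mem i)) (by omega)
  have eMu : (addr (Codebook.multiplicands v.mem (g.cb v.mem i) + 4 * (d.toNat * j + kk))).toNat =
      Codebook.multiplicands v.mem (g.cb v.mem i) + 4 * (d.toNat * j + kk) := toNat_addr _ (by omega)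
  -- 0x114f78: the check call of `mults[off]` (line 3915)
  u_walk hcode [hμ.vendor] until [Vorbis.L.start_decoder.ret267] span [Vorbis.L.textLo, Vorbis.L.textHi] side (first | v_side | (simp only [addr]; v_side))
  case check_114f78 =>
    have hun : ShadowUntouched v.mem s_114f78.mem := by v_untouched
    exact Vorbis.Spec.check_site hfr.shadow hun hsM (by u_omega)
  try clear w_zmm
  -- 0x114f7d: `movzx ebp, WORD PTR [rbp]` (mults[off]), the check of `c->delta_value`
  u_walk hcode [hμ.vendor] until [Vorbis.L.start_decoder.ret268] span [Vorbis.L.textLo, Vorbis.L.textHi] side (first | v_side | (simp only [addr]; v_side))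
  case check_114f85 =>
    have hun : ShadowUntouched v.mem s_114f85.mem := by v_untouched
    exact Vorbis.Spec.check_site hfr.shadow hun hs14 (by u_omega)
  try clear w_zmm
  -- 0x114f8a: `mults[off] * c->delta_value` (SSE), the check of `c->minimum_value`
  u_walk hcode [hμ.vendor] until [Vorbis.L.start_decoder.ret269] span [Vorbis.L.textLo, Vorbis.L.textHi] side (first | v_side | (simp only [addr]; v_side))
  case check_114fa0 =>
    have hun : ShadowUntouched v.mem s_114fa0.mem := by v_untouched
    exact Vorbis.Spec.check_site hfr.shadow hun hs10 (by u_omega)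
  try clear w_zmm
  -- 0x114fa5: `val = … + c->minimum_value + last` into `d[R+38H]`; `rbp = rdi = &multiplicands[j·D + k]`
  u_walk hcode [hμ.vendor, helem] until [Vorbis.L.start_decoder.ret270] span [Vorbis.L.textLo, Vorbis.L.textHi] side (first | v_side | (simp only [addr]; v_side))
  case check_114fd3 =>
    have hun : ShadowUntouched v.mem s_114fd3.mem := by v_untouched
    exact Vorbis.Spec.check_site hfr.shadow hun hsMu (by u_omega)
  try clear w_zmm
  rw [helem] at w_rbp
  -- 0x114fd8: the store `multiplicands[j·D + k] = val`, `rdi = &c->sequence_p`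
  u_walk hcode [hμ.vendor, helem] until [Vorbis.L.start_decoder.chk126] span [Vorbis.L.textLo, Vorbis.L.textHi] side (first | v_side | (simp only [addr]; v_side))
  case side_code =>
    right
    rw [eMu]
    have hw1 := hwhMu.1
    omega
  -- 0x114fe7, the check call of `c->sequence_p`: the invariant over the pushes, `d[R+38H]` and the store into `multiplicands`
  have hun : ShadowUntouched v.mem s_114fe3.mem := by v_untouched
  have hinv : (conv u₀).inv s_114fe3 := by v_inv
  have hs : Mem.SameExcept [⟨g.R - 8, g.R⟩, ⟨g.R + 56, g.R + 60⟩,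
      ⟨Codebook.multiplicands v.mem (g.cb v.mem i) + 4 * (d.toNat * j + kk),
        Codebook.multiplicands v.mem (g.cb v.mem i) + 4 * (d.toNat * j + kk) + 4⟩] v.mem s_114fe3.mem := by
    u_same
  have hq : ∀ x, x ∈ [(⟨g.R - 8, g.R⟩ : Span), ⟨g.R + 56, g.R + 60⟩,
      ⟨Codebook.multiplicands v.mem (g.cb v.mem i) + 4 * (d.toNat * j + kk),
        Codebook.multiplicands v.mem (g.cb v.mem i) + 4 * (d.toNat * j + kk) + 4⟩] → MuWin g i v.mem x := by
    intro x hx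
    simp only [List.mem_cons, List.not_mem_nil, or_false] at hx
    unfold MuWin C13.QuietWin13
    rw [hdq]
    have hi1 := hidx.1
    rcases hx with rfl | rfl | rfl
    · left
      left
      simp only []
      omega
    · left
      right
      left
      simp only []
      omega
    · right
      simp only []
      omega
  obtain ⟨hK, hcb⟩ := c13c_carry (pc' := Vorbis.L.start_decoder.chk126) h hs hun hq w_rip w_rsp w_eq hinv
    (w_kept.get .r14 rfl) (w_kept.get .r12 rfl) (w_kept.get .r15 rfl) (w_kept.get .rbx rfl)
  refine ReachVia.done ⟨A, mults, A2, A3, Ai, Am, hK, hklt, ?_⟩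
  rw [hcb, w_rdi]
  exact addr_add_lit _ _

end Vorbis.Spec.start_decoder_C13c

theorem Vorbis.Spec.Worked.start_decoder_C13c_ok : Vorbis.Spec.start_decoder_C13c.Statement := Vorbis.Spec.start_decoder_C13c.c13c_walk
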